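-- pv_equiv track=rewrite | github.com/arnold-1324/Maang-Tracker | training/adaptive_learning_agent.py | _recommend_next_topics
-- ===== SOURCE A (Python) =====
-- from typing import List, Dict, Any
-- from collections import defaultdict
--
-- def _recommend_next_topics(gaps: Dict[str, Any]) -> List[str]:
--     """Recommend next topics to study based on gaps and priority"""
--     priorities = defaultdict(list)
--
--     for topic, gap_data in gaps.items():
--         priority = gap_data["priority"]
--         priorities[priority].append(topic)
--
--     # Return topics in order: critical > high > medium
--     recommendations = (
--         priorities.get("critical", []) +
--         priorities.get("high", []) +
--         priorities.get("medium", [])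
--     )
--
--     return recommendations[:5]  # Top 5 recommendations
-- ===== SOURCE B (Python) =====
-- from typing import List, Dict, Any
--
-- def _recommend_next_topics(gaps: Dict[str, Any]) -> List[str]:
--     """Recommend next topics: one full scan of gaps per priority label,
--     concatenated in critical > high > medium order, then top 5."""
--     result = []
--     for priority in ("critical", "high", "medium"):
--         for topic, gap_data in gaps.items():
--             if gap_data["priority"] == priority:
--                 result.append(topic)
--     return result[:5]
-- ===== Notes on version B (the rewrite author's own statement) =====
-- stated objective: alternative
-- what changed: B drops the defaultdict grouping entirely: it rescans gaps once per priority label (critical, then high, then medium) in a fixed outer loop, appending matching topics directly to one result list, then slices the top 5.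
import Mathlib
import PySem

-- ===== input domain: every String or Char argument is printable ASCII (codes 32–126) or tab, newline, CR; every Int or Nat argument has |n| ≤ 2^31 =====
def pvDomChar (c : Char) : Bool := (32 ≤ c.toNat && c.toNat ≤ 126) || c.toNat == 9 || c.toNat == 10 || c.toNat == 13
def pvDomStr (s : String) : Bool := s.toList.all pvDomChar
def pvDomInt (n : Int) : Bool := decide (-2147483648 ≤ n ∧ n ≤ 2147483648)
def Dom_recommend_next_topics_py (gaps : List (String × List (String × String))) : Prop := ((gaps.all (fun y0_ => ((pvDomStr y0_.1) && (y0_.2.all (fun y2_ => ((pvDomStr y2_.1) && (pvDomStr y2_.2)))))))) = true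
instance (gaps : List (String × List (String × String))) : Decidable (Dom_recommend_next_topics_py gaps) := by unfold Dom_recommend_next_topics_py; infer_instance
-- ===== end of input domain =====

-- B rescans gaps once per priority label instead of grouping into a defaultdict; same output, same cost class.
-- gap_data["priority"]: first-match dict lookup; 'none' = Python KeyError, excluded by Pre_ (default "" is never used there)
def pvPrio (gd : List (String × String)) : String :=
  ((PySem.Dict.mk gd).get? "priority").getD ""

-- ===== PORT A =====
def recommend_next_topics_py (gaps : List (String × List (String × String))) : List String :=
  -- priorities = defaultdict(list); for topic, gap_data in gaps.items(): priorities[gap_data["priority"]].append(topic)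
  let priorities : PySem.Dict String (List String) :=
    gaps.foldl (fun d tg => d.modify (pvPrio tg.2) [] (· ++ [tg.1])) PySem.Dict.empty
  let recommendations :=
    priorities.getD "critical" [] ++ priorities.getD "high" [] ++ priorities.getD "medium" []
  recommendations.take 5

-- ===== PORT B =====
def recommend_next_topics_py_alt (gaps : List (String × List (String × String))) : List String :=
  -- for priority in ("critical","high","medium"): for topic, gap_data in gaps.items(): if match: result.append(topic)
  let result : List String :=
    ["critical", "high", "medium"].foldl
      (fun acc p => gaps.foldl (fun acc2 tg => if pvPrio tg.2 == p then acc2 ++ [tg.1] else acc2) acc) []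
  result.take 5

-- ===== PRECONDITION & SPEC =====
-- Pre_ excludes entries whose gap_data lacks the key "priority" (A raises KeyError there), and
-- association lists with duplicate keys (outer or inner), where the list does not represent a
-- Python dict unambiguously (first-vs-last match is anybody's choice).
def Pre_recommend_next_topics_py (gaps : List (String × List (String × String))) : Prop :=
  (gaps.map Prod.fst).Nodup ∧
  ∀ tg ∈ gaps, (tg.2.map Prod.fst).Nodup ∧ "priority" ∈ tg.2.map Prod.fst
instance (gaps : List (String × List (String × String))) : Decidable (Pre_recommend_next_topics_py gaps) := by unfold Pre_recommend_next_topics_py; infer_instance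
def pvWitness_recommend_next_topics_py : (List (String × List (String × String))) :=
  [("arrays", [("priority", "critical"), ("gap", "big")]),
   ("dp", [("priority", "high")]),
   ("graphs", [("priority", "medium")])]
def Spec_recommend_next_topics_py (gaps : List (String × List (String × String))) (out : List String) : Prop := out = recommend_next_topics_py_alt gaps
instance (gaps : List (String × List (String × String))) (out : List String) : Decidable (Spec_recommend_next_topics_py gaps out) := by unfold Spec_recommend_next_topics_py; infer_instance

-- ===== CLAIM (what is proved, stated in full; the proofs are below) =====
def Claim_equal_recommend_next_topics_py : Prop := ∀ (gaps : List (String × List (String × String))), Dom_recommend_next_topics_py gaps → Pre_recommend_next_topics_py gaps → Spec_recommend_next_topics_py gaps (recommend_next_topics_py gaps)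

-- ===== LEMMAS AND PROOFS =====

-- A's grouping dict, read back at key p, is exactly the in-order list of topics whose priority is p.
theorem getD_build (gaps : List (String × List (String × String)))
    (d : PySem.Dict String (List String)) (p : String) :
    (gaps.foldl (fun d tg => d.modify (pvPrio tg.2) [] (· ++ [tg.1])) d).getD p []
      = d.getD p [] ++ (gaps.filter (fun tg => pvPrio tg.2 == p)).map Prod.fst := by
  induction gaps generalizing d with
  | nil => simp
  | cons tg rest ih =>
    simp only [List.foldl_cons, ih, List.filter_cons]
    by_cases h : pvPrio tg.2 = p
    · subst h
      simp [PySem.Dict.getD_modify_self]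
    · rw [PySem.Dict.getD_modify_of_ne]
      · simp [beq_iff_eq, h]
      · exact fun hs => h hs.symm

theorem recommend_next_topics_py_eq_alt (gaps : List (String × List (String × String))) :
    recommend_next_topics_py gaps = recommend_next_topics_py_alt gaps := by
  unfold recommend_next_topics_py recommend_next_topics_py_alt
  simp only [List.foldl_cons, List.foldl_nil, PySem.List.foldl_append_if, getD_build,
    PySem.Dict.getD_empty, List.nil_append, List.append_assoc]

-- ===== VERDICT (by name: the statement is the Claim_ definition above) =====
theorem recommend_next_topics_py_spec : Claim_equal_recommend_next_topics_py := by
  intro gaps _ _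
  exact recommend_next_topics_py_eq_alt gaps
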